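-- pv_equiv track=rewrite | github.com/ivnle/transformers-GAD | check_is_valid_string.py | is_valid_string_0
-- ===== SOURCE A (Python) =====
-- def is_valid_string_0(s: str) -> bool:
--     # Check if empty or contains any character other than '0' or '1'
--     if not s or any(c not in '01' for c in s):
--         return False
--
--     # Check if the s follows the pattern of one or more '1's optionally followed by a single '0'
--     if s == '0':  # Single '0' is valid
--         return True
--     if s.endswith('0'):  # If it ends with '0', the rest must be '1's
--         return all(c == '1' for c in s[:-1])
--     else:  # If it doesn't end with '0', all characters must be '1's
--         return all(c == '1' for c in s)
-- ===== SOURCE B (Python) =====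
-- def is_valid_string_0(s: str) -> bool:
--     if not s:
--         return False
--     seen_zero = False
--     for c in s:
--         if c == '1':
--             if seen_zero:
--                 return False
--         elif c == '0':
--             if seen_zero:
--                 return False
--             seen_zero = True
--         else:
--             return False
--     return True
-- ===== Notes on version B (the rewrite author's own statement) =====
-- stated objective: simpler
-- what changed: Replaced A's multiple passes (membership any-scan, equality special case, endswith check, all-scan over a slice) by one left-to-right scan keeping a seen-zero flag that rejects any character after a zero and any non-binary character.
import Mathlib
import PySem

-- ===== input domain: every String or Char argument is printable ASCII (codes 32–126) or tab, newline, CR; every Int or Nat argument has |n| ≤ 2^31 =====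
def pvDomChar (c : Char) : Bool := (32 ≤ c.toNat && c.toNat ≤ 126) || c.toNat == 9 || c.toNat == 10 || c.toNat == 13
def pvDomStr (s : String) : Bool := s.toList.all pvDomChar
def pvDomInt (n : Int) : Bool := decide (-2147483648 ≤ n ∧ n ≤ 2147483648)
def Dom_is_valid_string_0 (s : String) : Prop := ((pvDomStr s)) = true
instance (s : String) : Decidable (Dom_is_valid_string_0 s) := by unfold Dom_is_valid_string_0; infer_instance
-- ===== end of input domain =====

-- B replaces A's several passes (any / == '0' / endswith / all over a slice) by one
-- left-to-right scan with a single seen_zero flag; same return value, proved equal below.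

-- ===== PORT A =====
-- literal transliteration of A: empty/non-binary check, '0' special case,
-- endswith('0') with all over s[:-1], else all over s.
def is_valid_string_0 (s : String) : Bool :=
  if s.toList = [] ∨ s.toList.any (fun c => ¬ (c = '0' ∨ c = '1')) then false
  else if s.toList = ['0'] then true
  else if PySem.Chars.endswith s.toList ['0'] then
    (PySem.List.slice s.toList none (some (-1))).all (fun c => c = '1')
  else s.toList.all (fun c => c = '1')

-- ===== PORT B =====
-- the loop of Source B: one pass, state = seen_zero
def altLoop : List Char → Bool → Bool
  | [], _ => true
  | c :: cs, seen =>
    if c = '1' then (if seen then false else altLoop cs seen)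
    else if c = '0' then (if seen then false else altLoop cs true)
    else false

def is_valid_string_0_alt (s : String) : Bool :=
  if s.toList = [] then false else altLoop s.toList false

-- ===== PRECONDITION & SPEC =====
def Spec_is_valid_string_0 (s : String) (out : Bool) : Prop := out = is_valid_string_0_alt s
instance (s : String) (out : Bool) : Decidable (Spec_is_valid_string_0 s out) := by unfold Spec_is_valid_string_0; infer_instance

-- ===== CLAIM (what is proved, stated in full; the proofs are below) =====
def Claim_equal_is_valid_string_0 : Prop := ∀ (s : String), Dom_is_valid_string_0 s → Spec_is_valid_string_0 s (is_valid_string_0 s)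

-- ===== LEMMAS AND PROOFS =====

-- characterisation of B's scan: valid iff all '1's, or all-'1' prefix followed by a final '0'
theorem altLoop_spec (l : List Char) :
    altLoop l false =
      (l.all (fun c => c = '1') ||
        (l.dropLast.all (fun c => c = '1') && (l.getLast? == some '0'))) := by
  induction l with
  | nil => simp [altLoop]
  | cons c cs ih =>
    cases cs with
    | nil =>
      by_cases h1 : c = '1'
      · subst h1; simp [altLoop]
      · by_cases h0 : c = '0'
        · subst h0; simp [altLoop]
        · simp [altLoop, h1, h0]
    | cons d ds =>
      by_cases h1 : c = '1'
      · subst h1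
        simp only [altLoop, if_neg (Bool.false_ne_true)] at *
        simpa [List.dropLast_cons_of_ne_nil, List.getLast?_cons_cons] using ih
      · by_cases h0 : c = '0'
        · subst h0
          simp [altLoop, List.dropLast_cons_of_ne_nil, h1]
        · simp [altLoop, h1, h0, List.dropLast_cons_of_ne_nil]

theorem endswith_concat (l : List Char) (a : Char) :
    PySem.Chars.endswith (l ++ [a]) ['0'] = decide (a = '0') := by
  rcases PySem.Chars.endswith_iff (l ++ [a]) ['0'] with h
  by_cases ha : a = '0'
  · subst ha
    simp [PySem.Chars.endswith_iff]
  · simp only [decide_eq_false ha]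
    by_contra hc
    have : ['0'] <:+ l ++ [a] := (PySem.Chars.endswith_iff _ _).1 (by
      cases hE : PySem.Chars.endswith (l ++ [a]) ['0'] with
      | true => rfl
      | false => exact absurd hE hc)
    rcases this with ⟨t, ht⟩
    have : a = '0' := by
      have h2 : (t ++ ['0']).getLast? = (l ++ [a]).getLast? := by rw [ht]
      simpa using h2.symm
    exact ha this

-- ===== VERDICT (by name: the statement is the Claim_ definition above) =====
theorem is_valid_string_0_spec : Claim_equal_is_valid_string_0 := by
  intro s _
  unfold Spec_is_valid_string_0 is_valid_string_0 is_valid_string_0_alt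
  rcases List.eq_nil_or_concat s.toList with hnil | ⟨l, a, hl⟩
  · simp [hnil]
  · rw [hl, List.concat_eq_append]
    have hne : l ++ [a] ≠ [] := by simp
    rw [if_neg hne, altLoop_spec, endswith_concat,
      PySem.List.slice_to_neg_one]
    by_cases hbad : (l ++ [a]).any (fun c => ¬ (c = '0' ∨ c = '1'))
    · rw [if_pos (Or.inr hbad)]
      rcases List.any_eq_true.1 hbad with ⟨b, hb, hbp⟩
      simp only [decide_eq_true_eq, not_or] at hbp
      obtain ⟨hb0, hb1⟩ := hbp
      have hall : ((l ++ [a]).all (fun c => decide (c = '1'))) = false := by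
        rw [List.all_eq_false]; exact ⟨b, hb, by simp [hb1]⟩
      rw [hall, Bool.false_or]
      by_cases ha0 : a = '0'
      · have hbl : b ∈ l := by
          rcases List.mem_append.1 hb with h | h
          · exact h
          · exact absurd (by simpa [ha0] using h) hb0
        have hd : (l ++ [a]).dropLast = l := by simp
        have hl1 : (l.all (fun c => decide (c = '1'))) = false := by
          rw [List.all_eq_false]; exact ⟨b, hbl, by simp [hb1]⟩
        rw [hd, hl1]; simp
      · simp [ha0]
    · rw [if_neg (not_or.2 ⟨hne, hbad⟩)]
      by_cases h0 : l ++ [a] = ['0']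
      · have hl0 : l = [] ∧ a = '0' := by
          cases l with
          | nil => simpa using h0
          | cons x xs =>
            exfalso
            have := congrArg List.length h0
            simp at this
        obtain ⟨rfl, rfl⟩ := hl0
        simp
      · rw [if_neg h0]
        by_cases ha0 : a = '0'
        · subst ha0
          have hall : ((l ++ ['0']).all (fun c => decide (c = '1'))) = false := by
            rw [List.all_eq_false]; exact ⟨'0', by simp, by decide⟩
          simp [hall]
        · simp [ha0]
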